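-- pv_equiv track=rewrite | github.com/miroegres/AoC2025 | d12/p1_opt.py | all_orientations
-- ===== SOURCE A (Python) =====
-- from typing import List, Tuple, Set, Dict, Optional
--
-- def all_orientations(coords: Set[Tuple[int,int]]) -> List[Set[Tuple[int,int]]]:
--     """
--     Generate all unique orientations (rotations 0/90/180/270 and horizontal flip).
--     Normalize each to origin and remove duplicates.
--     """
--     def normalize(cs: Set[Tuple[int,int]]) -> Set[Tuple[int,int]]:
--         minx = min(x for x, y in cs)
--         miny = min(y for x, y in cs)
--         return {(x - minx, y - miny) for (x, y) in cs}
--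
--     def rot90(cs: Set[Tuple[int,int]]) -> Set[Tuple[int,int]]:
--         return {(y, -x) for (x, y) in cs}
--
--     def flipx(cs: Set[Tuple[int,int]]) -> Set[Tuple[int,int]]:
--         return {(-x, y) for (x, y) in cs}
--
--     variants = set()
--     base = coords
--     for flipped in [False, True]:
--         cs = base if not flipped else flipx(base)
--         for r in range(4):
--             if r > 0:
--                 cs = rot90(cs)
--             variants.add(frozenset(normalize(cs)))
--     return [set(v) for v in variants]
-- ===== SOURCE B (Python) =====
-- def all_orientations(coords):
--     """
--     Generate all unique orientations (rotations 0/90/180/270 and horizontal flip).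
--     Orbit closure: depth-first search over the group generated by rot90 and flipx,
--     acting on origin-normalized shapes, instead of enumerating flip x rotation pairs.
--     """
--     def norm(cs):
--         mx = min(x for x, _ in cs)
--         my = min(y for _, y in cs)
--         return frozenset((x - mx, y - my) for x, y in cs)
--
--     seen = set()
--
--     def visit(v):
--         if v in seen:
--             return
--         seen.add(v)
--         visit(norm({(y, -x) for x, y in v}))
--         visit(norm({(-x, y) for x, y in v}))
--
--     visit(norm(coords))
--     return [set(v) for v in seen]
-- ===== Notes on version B (the rewrite author's own statement) =====
-- stated objective: alternative
-- what changed: Replaced A's explicit enumeration of the 8 flip x rotation combinations (nested loops threading an incrementally rotated point set) by a recursive depth-first orbit closure: starting from the normalized shape, B repeatedly applies the two group generators rot90 and flipx to unseen normalized shapes until the seen-set is closed.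
import Mathlib
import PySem

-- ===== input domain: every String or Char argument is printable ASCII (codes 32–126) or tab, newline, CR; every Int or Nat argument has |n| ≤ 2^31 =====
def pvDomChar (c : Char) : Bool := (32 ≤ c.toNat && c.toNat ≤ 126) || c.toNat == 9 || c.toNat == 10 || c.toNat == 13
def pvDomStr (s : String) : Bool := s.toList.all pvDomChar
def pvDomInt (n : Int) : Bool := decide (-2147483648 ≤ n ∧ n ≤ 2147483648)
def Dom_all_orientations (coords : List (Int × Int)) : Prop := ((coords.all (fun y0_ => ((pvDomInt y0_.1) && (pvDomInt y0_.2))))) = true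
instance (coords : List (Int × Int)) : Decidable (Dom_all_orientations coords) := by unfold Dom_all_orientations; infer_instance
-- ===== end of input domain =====

-- B replaces A's explicit enumeration of the 8 flip×rotation combinations by a recursive
-- depth-first ORBIT CLOSURE under the two group generators rot90 and flipx, acting on
-- origin-normalized shapes (objective: alternative algorithm of the same cost).
-- Both Pythons return [set(v) for v in <a set of frozensets>]; that set's iteration order
-- is hash-based and NOT modeled: both ports present the resulting variant set in one
-- canonical sorted order (pvCanon below); results are compared as sets of sets.

-- shared modeling device for '[set(v) for v in <set>]' (not part of either algorithm):
-- each variant sorted, then the variants sorted lexicographically (instances pinned to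
-- the LinearOrder on List Int so the order lemmas apply)
def pvKIn (p : Int × Int) : List Int := [p.1, p.2]
def pvKOut (v : List (Int × Int)) : List Int := v.flatMap (fun p => [p.1, p.2])
def pvCanon (vs : List (List (Int × Int))) : List (List (Int × Int)) :=
  @PySem.List.sorted _ _ List.instLinearOrder.toLT List.instLinearOrder.toDecidableLT
    (vs.map (fun v => @PySem.List.sorted _ _ List.instLinearOrder.toLT List.instLinearOrder.toDecidableLT v pvKIn false))
    pvKOut false

-- ===== PORT A =====
-- normalize(cs): min() raises ValueError on empty cs; the total '.getD 0' form is used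
-- only under Pre_ (coords ≠ [], and every intermediate cs is nonempty then).
def pvNormalize (cs : List (Int × Int)) : List (Int × Int) :=
  let minx := (PySem.List.min? (cs.map (fun p => p.1)) (fun v => v)).getD 0
  let miny := (PySem.List.min? (cs.map (fun p => p.2)) (fun v => v)).getD 0
  PySem.Set.ofList (cs.map (fun p => (p.1 - minx, p.2 - miny)))

def pvRot90 (cs : List (Int × Int)) : List (Int × Int) :=
  PySem.Set.ofList (cs.map (fun p => (p.2, -p.1)))

def pvFlipx (cs : List (Int × Int)) : List (Int × Int) :=
  PySem.Set.ofList (cs.map (fun p => (-p.1, p.2)))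

-- variants.add(frozenset(v)) / 'v in seen' for BOTH Pythons: frozenset equality is set equality
def pvAddFrozen (vs : List (List (Int × Int))) (v : List (Int × Int)) : List (List (Int × Int)) :=
  if vs.any (fun w => PySem.Set.equal w v) then vs else vs ++ [v]

def all_orientations (coords : List (Int × Int)) : List (List (Int × Int)) :=
  pvCanon (([false, true]).foldl (fun variants flipped =>
    let cs0 := if flipped then pvFlipx coords else coords
    ((PySem.List.pyRange 0 4 1).foldl
      (fun (st : List (Int × Int) × List (List (Int × Int))) (r : Int) =>
        let cs := if r > 0 then pvRot90 st.1 else st.1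
        (cs, pvAddFrozen st.2 (pvNormalize cs)))
      (cs0, variants)).2) [])

-- ===== PORT B =====
-- Source B's norm(cs)
def pvNormB (cs : List (Int × Int)) : List (Int × Int) :=
  let mx := (PySem.List.min? (cs.map (fun p => p.1)) (fun v => v)).getD 0
  let my := (PySem.List.min? (cs.map (fun p => p.2)) (fun v => v)).getD 0
  PySem.Set.ofList (cs.map (fun p => (p.1 - mx, p.2 - my)))

-- the two set comprehensions {(y,-x) …} and {(-x,y) …} that visit feeds to norm
def pvRotB (v : List (Int × Int)) : List (Int × Int) :=
  PySem.Set.ofList (v.map (fun p => (p.2, -p.1)))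

def pvFlipB (v : List (Int × Int)) : List (Int × Int) :=
  PySem.Set.ofList (v.map (fun p => (-p.1, p.2)))

-- visit(v): DFS closure over the two generators; 'fuel' is only a termination guard and
-- is never exhausted on any input (the orbit has at most 8 shapes, fuel starts at 20)
def pvVisit : Nat → List (Int × Int) → List (List (Int × Int)) → List (List (Int × Int))
  | 0, _, seen => seen
  | fuel + 1, v, seen =>
    if seen.any (fun w => PySem.Set.equal w v) then seen
    else
      let seen1 := seen ++ [v]
      let seen2 := pvVisit fuel (pvNormB (pvRotB v)) seen1
      pvVisit fuel (pvNormB (pvFlipB v)) seen2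

def all_orientations_alt (coords : List (Int × Int)) : List (List (Int × Int)) :=
  pvCanon (pvVisit 20 (pvNormB coords) [])

-- ===== PRECONDITION & SPEC =====
-- Pre_ excludes only the empty list, on which Python A raises ValueError (min() of an
-- empty sequence); B raises there too.
def Pre_all_orientations (coords : List (Int × Int)) : Prop := coords ≠ []
instance (coords : List (Int × Int)) : Decidable (Pre_all_orientations coords) := by unfold Pre_all_orientations; infer_instance

def pvWitness_all_orientations : (List (Int × Int)) := [(0, 0), (1, 0), (1, 1)]

def Spec_all_orientations (coords : List (Int × Int)) (out : List (List (Int × Int))) : Prop := out = all_orientations_alt coords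
instance (coords : List (Int × Int)) (out : List (List (Int × Int))) : Decidable (Spec_all_orientations coords out) := by unfold Spec_all_orientations; infer_instance

-- ===== CLAIM (what is proved, stated in full; the proofs are below) =====
def Claim_equal_all_orientations : Prop := ∀ (coords : List (Int × Int)), Dom_all_orientations coords → Pre_all_orientations coords → Spec_all_orientations coords (all_orientations coords)

-- ===== LEMMAS AND PROOFS =====

theorem pv_foldl_add_map (f : (Int × Int) → (Int × Int)) (hf : Function.Injective f) :
    ∀ (l acc : List (Int × Int)),
      (l.map f).foldl PySem.Set.add (acc.map f) = (l.foldl PySem.Set.add acc).map f := by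
  intro l
  induction l with
  | nil => intro acc; rfl
  | cons x t ih =>
    intro acc
    have hc : PySem.Set.add (acc.map f) (f x) = (PySem.Set.add acc x).map f := by
      by_cases hx : x ∈ acc
      · simp [PySem.Set.add, PySem.Set.contains, hx, List.mem_map, hf.eq_iff]
      · simp [PySem.Set.add, PySem.Set.contains, hx, List.mem_map, hf.eq_iff]
    simpa [List.foldl, hc] using ih (PySem.Set.add acc x)

theorem pv_ofList_map (f : (Int × Int) → (Int × Int)) (hf : Function.Injective f)
    (l : List (Int × Int)) :
    PySem.Set.ofList (l.map f) = (PySem.Set.ofList l).map f := by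
  simpa [PySem.Set.ofList, PySem.Set.empty] using pv_foldl_add_map f hf l []

theorem pv_foldl_add_nodup :
    ∀ (l acc : List (Int × Int)), (acc ++ l).Nodup → l.foldl PySem.Set.add acc = acc ++ l := by
  intro l
  induction l with
  | nil => intro acc _; simp
  | cons x t ih =>
    intro acc h
    have hx : x ∉ acc := by
      intro hmem
      exact (List.disjoint_of_nodup_append h hmem) (by simp)
    have h' : ((acc ++ [x]) ++ t).Nodup := by simpa using h
    have := ih (acc ++ [x]) h'
    simp only [List.foldl, PySem.Set.add, PySem.Set.contains, List.contains_iff_mem]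
    simp [hx, this]

theorem pv_ofList_of_nodup (l : List (Int × Int)) (h : l.Nodup) :
    PySem.Set.ofList l = l := by
  simpa [PySem.Set.ofList, PySem.Set.empty] using pv_foldl_add_nodup l [] (by simpa using h)

theorem pv_ofList_map_ofList (f : (Int × Int) → (Int × Int)) (hf : Function.Injective f)
    (l : List (Int × Int)) :
    PySem.Set.ofList ((PySem.Set.ofList l).map f) = PySem.Set.ofList (l.map f) := by
  have hn : ((PySem.Set.ofList l).map f).Nodup :=
    (PySem.Set.nodup_ofList l).map hf
  rw [pv_ofList_of_nodup _ hn, pv_ofList_map f hf]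

theorem pv_min_congr (xs ys : List Int) (h : ∀ a : Int, a ∈ xs ↔ a ∈ ys) :
    PySem.List.min? xs (fun v => v) = PySem.List.min? ys (fun v => v) := by
  cases hx : PySem.List.min? xs (fun v => v) with
  | none =>
    rw [PySem.List.min?_eq_none_iff] at hx
    subst hx
    have : ys = [] := by
      cases ys with
      | nil => rfl
      | cons b t => exact absurd ((h b).2 (by simp)) (by simp)
    simp [this, PySem.List.min?]
  | some m =>
    have hys : ys ≠ [] := by
      intro hy
      have := PySem.List.min?_mem hx
      rw [h m, hy] at this
      simp at this
    cases hy : PySem.List.min? ys (fun v => v) with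
    | none => exact absurd ((PySem.List.min?_eq_none_iff ys _).1 hy) hys
    | some m' =>
      have h1 : m ≤ m' := PySem.List.min?_isMin hx m' ((h m').2 (PySem.List.min?_mem hy))
      have h2 : m' ≤ m := PySem.List.min?_isMin hy m ((h m).1 (PySem.List.min?_mem hx))
      exact congrArg some (le_antisymm h1 h2)

theorem pv_shift_inj (a b : Int) : Function.Injective (fun p : Int × Int => (p.1 - a, p.2 - b)) := by
  intro p q hpq
  simp only [Prod.mk.injEq] at hpq
  exact Prod.ext (by omega) (by omega)

theorem pv_norm_ofList (m : List (Int × Int)) :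
    pvNormalize (PySem.Set.ofList m) = pvNormalize m := by
  unfold pvNormalize
  have h1 : PySem.List.min? ((PySem.Set.ofList m).map (fun p => p.1)) (fun v => v)
      = PySem.List.min? (m.map (fun p => p.1)) (fun v => v) := by
    apply pv_min_congr; intro a; simp [List.mem_map, PySem.Set.mem_ofList]
  have h2 : PySem.List.min? ((PySem.Set.ofList m).map (fun p => p.2)) (fun v => v)
      = PySem.List.min? (m.map (fun p => p.2)) (fun v => v) := by
    apply pv_min_congr; intro a; simp [List.mem_map, PySem.Set.mem_ofList]
  simp only [h1, h2]
  exact pv_ofList_map_ofList _ (pv_shift_inj _ _) m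

-- min of a shifted list
theorem pv_foldl_min_sub (a : Int) :
    ∀ (t : List Int) (x : Int), (t.map (fun v => v - a)).foldl min (x - a) = t.foldl min x - a := by
  intro t
  induction t with
  | nil => intro x; rfl
  | cons y t ih =>
    intro x
    simp only [List.map, List.foldl]
    rw [show min (x - a) (y - a) = min x y - a from (min_sub_sub_right x y a), ih]

theorem pv_min_shift (xs : List Int) (a : Int) :
    PySem.List.min? (xs.map (fun v => v - a)) (fun v => v)
      = (PySem.List.min? xs (fun v => v)).map (fun v => v - a) := by
  cases xs with
  | nil => simp [PySem.List.min?]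
  | cons x t =>
    rw [show (x :: t).map (fun v => v - a) = (x - a) :: t.map (fun v => v - a) from rfl]
    rw [PySem.List.min?_id_cons, PySem.List.min?_id_cons]
    simp [pv_foldl_min_sub]

-- normalize is translation invariant
theorem pv_norm_shift (l : List (Int × Int)) (a b : Int) :
    pvNormalize (l.map (fun p => (p.1 - a, p.2 - b))) = pvNormalize l := by
  cases hl : l with
  | nil => rfl
  | cons x t =>
    rw [← hl]
    unfold pvNormalize
    have e1 : (l.map (fun p : Int × Int => (p.1 - a, p.2 - b))).map (fun p => p.1)
        = (l.map (fun p => p.1)).map (fun v => v - a) := by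
      simp [List.map_map, Function.comp]
    have e2 : (l.map (fun p : Int × Int => (p.1 - a, p.2 - b))).map (fun p => p.2)
        = (l.map (fun p => p.2)).map (fun v => v - b) := by
      simp [List.map_map, Function.comp]
    rw [e1, e2, pv_min_shift, pv_min_shift]
    cases hm1 : PySem.List.min? (l.map (fun p => p.1)) (fun v => v) with
    | none =>
      rw [PySem.List.min?_eq_none_iff] at hm1
      simp at hm1; simp [hm1] at hl
    | some m1 =>
      cases hm2 : PySem.List.min? (l.map (fun p => p.2)) (fun v => v) with
      | none =>
        rw [PySem.List.min?_eq_none_iff] at hm2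
        simp at hm2; simp [hm2] at hl
      | some m2 =>
        simp only [Option.map_some, Option.getD_some]
        congr 1
        simp only [List.map_map]
        apply List.map_congr_left
        intro p _
        exact Prod.ext (by simp only [Function.comp_apply]; ring) (by simp only [Function.comp_apply]; ring)

def pvStepR (w : List (Int × Int)) : List (Int × Int) := pvNormB (pvRotB w)
def pvStepF (w : List (Int × Int)) : List (Int × Int) := pvNormB (pvFlipB w)
def pvN (c : List (Int × Int)) (g : (Int × Int) → (Int × Int)) : List (Int × Int) :=
  pvNormalize (c.map g)
theorem pv_rot_inj : Function.Injective (fun p : Int × Int => (p.2, -p.1)) := by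
  intro p q hpq
  simp only [Prod.mk.injEq] at hpq
  exact Prod.ext (by omega) hpq.1

theorem pv_flip_inj : Function.Injective (fun p : Int × Int => (-p.1, p.2)) := by
  intro p q hpq
  simp only [Prod.mk.injEq] at hpq
  exact Prod.ext (by omega) hpq.2

theorem pv_normB_eq : pvNormB = pvNormalize := rfl

-- the DFS steps collapse to normalize of a plain map
theorem pv_stepR_eq (w : List (Int × Int)) :
    pvStepR w = pvNormalize (w.map (fun p => (p.2, -p.1))) := by
  show pvNormB (pvRotB w) = _
  rw [pv_normB_eq]
  unfold pvRotB
  exact pv_norm_ofList _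

theorem pv_stepF_eq (w : List (Int × Int)) :
    pvStepF w = pvNormalize (w.map (fun p => (-p.1, p.2))) := by
  show pvNormB (pvFlipB w) = _
  rw [pv_normB_eq]
  unfold pvFlipB
  exact pv_norm_ofList _

-- a step applied to a canonical shape is the canonical shape of the composed transform
theorem pv_stepR_pvN (c : List (Int × Int)) (g : (Int × Int) → (Int × Int)) :
    pvStepR (pvN c g) = pvN c (fun p => ((g p).2, -(g p).1)) := by
  rw [pv_stepR_eq]
  show pvNormalize ((pvNormalize (c.map g)).map (fun p => (p.2, -p.1)))
      = pvNormalize (c.map (fun p => ((g p).2, -(g p).1)))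
  rw [show c.map (fun p => ((g p).2, -(g p).1)) = (c.map g).map (fun p : Int × Int => (p.2, -p.1)) by
        rw [List.map_map]; exact List.map_congr_left (fun p _ => rfl)]
  generalize c.map g = M
  rw [show pvNormalize M = PySem.Set.ofList (M.map (fun p : Int × Int =>
        (p.1 - (PySem.List.min? (M.map (fun p => p.1)) (fun v => v)).getD 0,
         p.2 - (PySem.List.min? (M.map (fun p => p.2)) (fun v => v)).getD 0))) from rfl]
  generalize (PySem.List.min? (M.map (fun p => p.1)) (fun v => v)).getD 0 = a
  generalize (PySem.List.min? (M.map (fun p => p.2)) (fun v => v)).getD 0 = b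
  rw [← pv_ofList_map _ pv_rot_inj, pv_norm_ofList]
  rw [show (M.map (fun p : Int × Int => (p.1 - a, p.2 - b))).map (fun p : Int × Int => (p.2, -p.1))
        = (M.map (fun p : Int × Int => (p.2, -p.1))).map (fun p : Int × Int => (p.1 - b, p.2 - (-a))) by
      simp only [List.map_map]
      apply List.map_congr_left
      intro p _
      refine Prod.ext ?_ ?_ <;> simp only [Function.comp_apply] <;> ring]
  exact pv_norm_shift _ b (-a)

theorem pv_stepF_pvN (c : List (Int × Int)) (g : (Int × Int) → (Int × Int)) :
    pvStepF (pvN c g) = pvN c (fun p => (-(g p).1, (g p).2)) := by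
  rw [pv_stepF_eq]
  show pvNormalize ((pvNormalize (c.map g)).map (fun p => (-p.1, p.2)))
      = pvNormalize (c.map (fun p => (-(g p).1, (g p).2)))
  rw [show c.map (fun p => (-(g p).1, (g p).2)) = (c.map g).map (fun p : Int × Int => (-p.1, p.2)) by
        rw [List.map_map]; exact List.map_congr_left (fun p _ => rfl)]
  generalize c.map g = M
  rw [show pvNormalize M = PySem.Set.ofList (M.map (fun p : Int × Int =>
        (p.1 - (PySem.List.min? (M.map (fun p => p.1)) (fun v => v)).getD 0,
         p.2 - (PySem.List.min? (M.map (fun p => p.2)) (fun v => v)).getD 0))) from rfl]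
  generalize (PySem.List.min? (M.map (fun p => p.1)) (fun v => v)).getD 0 = a
  generalize (PySem.List.min? (M.map (fun p => p.2)) (fun v => v)).getD 0 = b
  rw [← pv_ofList_map _ pv_flip_inj, pv_norm_ofList]
  rw [show (M.map (fun p : Int × Int => (p.1 - a, p.2 - b))).map (fun p : Int × Int => (-p.1, p.2))
        = (M.map (fun p : Int × Int => (-p.1, p.2))).map (fun p : Int × Int => (p.1 - (-a), p.2 - b)) by
      simp only [List.map_map]
      apply List.map_congr_left
      intro p _
      refine Prod.ext ?_ ?_ <;> simp only [Function.comp_apply] <;> ring]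
  exact pv_norm_shift _ (-a) b

def pvG : List ((Int × Int) → (Int × Int)) :=
  [fun p => (p.1, p.2), fun p => (p.2, -p.1), fun p => (-p.1, -p.2), fun p => (-p.2, p.1),
   fun p => (-p.1, p.2), fun p => (p.2, p.1), fun p => (p.1, -p.2), fun p => (-p.2, -p.1)]
def pvU (c : List (Int × Int)) : List (List (Int × Int)) := pvG.map (pvN c)
def pvSM (S : List (List (Int × Int))) (v : List (Int × Int)) : Prop :=
  ∃ w ∈ S, PySem.Set.equal w v = true
def pvMsr (c : List (Int × Int)) (seen : List (List (Int × Int))) : Nat :=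
  (pvU c).countP (fun u => ! seen.any (fun w => PySem.Set.equal w u))
theorem pv_equal_refl (w : List (Int × Int)) : PySem.Set.equal w w = true :=
  (PySem.Set.equal_iff w w).2 (fun _ => Iff.rfl)

theorem pv_equal_symm {w v : List (Int × Int)} (h : PySem.Set.equal w v = true) :
    PySem.Set.equal v w = true :=
  (PySem.Set.equal_iff v w).2 (fun x => ((PySem.Set.equal_iff w v).1 h x).symm)

theorem pv_equal_trans {u v w : List (Int × Int)} (h1 : PySem.Set.equal u v = true)
    (h2 : PySem.Set.equal v w = true) : PySem.Set.equal u w = true :=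
  (PySem.Set.equal_iff u w).2
    (fun x => ((PySem.Set.equal_iff u v).1 h1 x).trans ((PySem.Set.equal_iff v w).1 h2 x))

theorem pv_equal_congr (f : (Int × Int) → (Int × Int)) {w w' : List (Int × Int)}
    (h : PySem.Set.equal w w' = true) :
    PySem.Set.equal (pvNormalize (w.map f)) (pvNormalize (w'.map f)) = true := by
  have hmem : ∀ a, a ∈ w ↔ a ∈ w' := (PySem.Set.equal_iff w w').1 h
  have h1 : PySem.List.min? ((w.map f).map (fun p => p.1)) (fun v => v)
      = PySem.List.min? ((w'.map f).map (fun p => p.1)) (fun v => v) := by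
    apply pv_min_congr
    intro a
    simp only [List.mem_map]
    constructor
    · rintro ⟨p, ⟨q, hq, rfl⟩, hpa⟩; exact ⟨f q, ⟨q, (hmem q).1 hq, rfl⟩, hpa⟩
    · rintro ⟨p, ⟨q, hq, rfl⟩, hpa⟩; exact ⟨f q, ⟨q, (hmem q).2 hq, rfl⟩, hpa⟩
  have h2 : PySem.List.min? ((w.map f).map (fun p => p.2)) (fun v => v)
      = PySem.List.min? ((w'.map f).map (fun p => p.2)) (fun v => v) := by
    apply pv_min_congr
    intro a
    simp only [List.mem_map]
    constructor
    · rintro ⟨p, ⟨q, hq, rfl⟩, hpa⟩; exact ⟨f q, ⟨q, (hmem q).1 hq, rfl⟩, hpa⟩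
    · rintro ⟨p, ⟨q, hq, rfl⟩, hpa⟩; exact ⟨f q, ⟨q, (hmem q).2 hq, rfl⟩, hpa⟩
  apply (PySem.Set.equal_iff _ _).2
  intro x
  unfold pvNormalize
  simp only [PySem.Set.mem_ofList, List.mem_map, h1, h2]
  constructor
  · rintro ⟨p, ⟨q, hq, rfl⟩, hx⟩; exact ⟨f q, ⟨q, (hmem q).1 hq, rfl⟩, hx⟩
  · rintro ⟨p, ⟨q, hq, rfl⟩, hx⟩; exact ⟨f q, ⟨q, (hmem q).2 hq, rfl⟩, hx⟩

theorem pv_stepR_congr {w w' : List (Int × Int)} (h : PySem.Set.equal w w' = true) :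
    PySem.Set.equal (pvStepR w) (pvStepR w') = true := by
  rw [pv_stepR_eq, pv_stepR_eq]; exact pv_equal_congr _ h

theorem pv_stepF_congr {w w' : List (Int × Int)} (h : PySem.Set.equal w w' = true) :
    PySem.Set.equal (pvStepF w) (pvStepF w') = true := by
  rw [pv_stepF_eq, pv_stepF_eq]; exact pv_equal_congr _ h

theorem pv_sm_of_mem {S : List (List (Int × Int))} {v : List (Int × Int)} (h : v ∈ S) :
    pvSM S v := ⟨v, h, pv_equal_refl v⟩

theorem pv_sm_mono {S T : List (List (Int × Int))} (h : ∀ x ∈ S, x ∈ T)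
    {v : List (Int × Int)} (hv : pvSM S v) : pvSM T v := by
  obtain ⟨w, hw, he⟩ := hv
  exact ⟨w, h w hw, he⟩

theorem pv_sm_any (S : List (List (Int × Int))) (v : List (Int × Int)) :
    S.any (fun w => PySem.Set.equal w v) = true ↔ pvSM S v := by
  simp [pvSM, List.any_eq_true]

theorem pv_countP_lt {α : Type} (l : List α) (p q : α → Bool)
    (hmono : ∀ a ∈ l, p a = true → q a = true)
    (hex : ∃ a ∈ l, q a = true ∧ p a = false) : l.countP p < l.countP q := by
  induction l with
  | nil => simp at hex
  | cons x t ih =>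
    by_cases hqx : q x = true
    · by_cases hpx : p x = true
      · have hex' : ∃ a ∈ t, q a = true ∧ p a = false := by
          obtain ⟨a, ha, hqa, hpa⟩ := hex
          rcases List.mem_cons.1 ha with rfl | ha
          · rw [hpx] at hpa; cases hpa
          · exact ⟨a, ha, hqa, hpa⟩
        have := ih (fun a ha h => hmono a (List.mem_cons_of_mem _ ha) h) hex'
        simp [hqx, hpx]; omega
      · have h1 : t.countP p ≤ t.countP q := by
          apply List.countP_mono_left
          intro a ha h
          exact hmono a (List.mem_cons_of_mem _ ha) h
        simp only [Bool.not_eq_true] at hpx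
        simp [hqx, hpx]; omega
    · have hpx : p x ≠ true := fun h => hqx (hmono x (by simp) h)
      have hex' : ∃ a ∈ t, q a = true ∧ p a = false := by
        obtain ⟨a, ha, hqa, hpa⟩ := hex
        rcases List.mem_cons.1 ha with rfl | ha
        · exact absurd hqa hqx
        · exact ⟨a, ha, hqa, hpa⟩
      have := ih (fun a ha h => hmono a (List.mem_cons_of_mem _ ha) h) hex'
      simp only [Bool.not_eq_true] at hqx hpx
      simp [hqx, hpx]; omega

theorem pv_msr_mono (c : List (Int × Int)) {S T : List (List (Int × Int))}
    (h : ∀ x ∈ S, x ∈ T) : pvMsr c T ≤ pvMsr c S := by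
  apply List.countP_mono_left
  intro u _ hu
  simp only [Bool.not_eq_true', List.any_eq_false] at hu ⊢
  intro w hw
  exact hu w (h w hw)

theorem pv_msr_lt (c : List (Int × Int)) {seen : List (List (Int × Int))}
    {v : List (Int × Int)} (hv : v ∈ pvU c)
    (hnew : seen.any (fun w => PySem.Set.equal w v) = false) :
    pvMsr c (seen ++ [v]) < pvMsr c seen := by
  apply pv_countP_lt
  · intro u _ hu
    simp only [Bool.not_eq_true', List.any_eq_false] at hu ⊢
    intro w hw
    exact hu w (List.mem_append_left _ hw)
  · refine ⟨v, hv, ?_, ?_⟩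
    · simpa using hnew
    · simp only [Bool.not_eq_false', List.any_eq_true]
      exact ⟨v, by simp, pv_equal_refl v⟩

theorem pv_start_eq (c : List (Int × Int)) : pvNormB c = pvN c (fun p => (p.1, p.2)) := by
  rw [pv_normB_eq]
  unfold pvN
  congr 1
  simp

theorem pv_pvN_eqv (c : List (Int × Int)) {g g' : (Int × Int) → (Int × Int)}
    (h : ∀ p, g p = g' p) : pvN c g = pvN c g' := by
  unfold pvN
  rw [List.map_congr_left (fun p _ => h p)]

theorem pv_pvN_mem (c : List (Int × Int)) {g g' : (Int × Int) → (Int × Int)}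
    (h : ∀ p, g p = g' p) (hg' : g' ∈ pvG) : pvN c g ∈ pvU c := by
  rw [pv_pvN_eqv c h]
  exact List.mem_map_of_mem hg'

theorem pv_g_mem_0 : (fun p : Int × Int => (p.1, p.2)) ∈ pvG := by unfold pvG; exact .head _
theorem pv_g_mem_1 : (fun p : Int × Int => (p.2, -p.1)) ∈ pvG := by unfold pvG; exact .tail _ (.head _)
theorem pv_g_mem_2 : (fun p : Int × Int => (-p.1, -p.2)) ∈ pvG := by unfold pvG; exact .tail _ (.tail _ (.head _))
theorem pv_g_mem_3 : (fun p : Int × Int => (-p.2, p.1)) ∈ pvG := by unfold pvG; exact .tail _ (.tail _ (.tail _ (.head _)))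
theorem pv_g_mem_4 : (fun p : Int × Int => (-p.1, p.2)) ∈ pvG := by unfold pvG; exact .tail _ (.tail _ (.tail _ (.tail _ (.head _))))
theorem pv_g_mem_5 : (fun p : Int × Int => (p.2, p.1)) ∈ pvG := by unfold pvG; exact .tail _ (.tail _ (.tail _ (.tail _ (.tail _ (.head _)))))
theorem pv_g_mem_6 : (fun p : Int × Int => (p.1, -p.2)) ∈ pvG := by unfold pvG; exact .tail _ (.tail _ (.tail _ (.tail _ (.tail _ (.tail _ (.head _))))))
theorem pv_g_mem_7 : (fun p : Int × Int => (-p.2, -p.1)) ∈ pvG := by unfold pvG; exact .tail _ (.tail _ (.tail _ (.tail _ (.tail _ (.tail _ (.tail _ (.head _)))))))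

theorem pv_stepR_mem (c : List (Int × Int)) {w : List (Int × Int)} (hw : w ∈ pvU c) :
    pvStepR w ∈ pvU c := by
  simp only [pvU, List.mem_map] at hw
  obtain ⟨g, hg, rfl⟩ := hw
  simp only [pvG, List.mem_cons, List.not_mem_nil, or_false] at hg
  rcases hg with rfl | rfl | rfl | rfl | rfl | rfl | rfl | rfl <;> rw [pv_stepR_pvN]
  · exact pv_pvN_mem c (fun p => by simp) pv_g_mem_1
  · exact pv_pvN_mem c (fun p => by simp) pv_g_mem_2
  · exact pv_pvN_mem c (fun p => by simp) pv_g_mem_3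
  · exact pv_pvN_mem c (fun p => by simp) pv_g_mem_0
  · exact pv_pvN_mem c (fun p => by simp) pv_g_mem_5
  · exact pv_pvN_mem c (fun p => by simp) pv_g_mem_6
  · exact pv_pvN_mem c (fun p => by simp) pv_g_mem_7
  · exact pv_pvN_mem c (fun p => by simp) pv_g_mem_4

theorem pv_stepF_mem (c : List (Int × Int)) {w : List (Int × Int)} (hw : w ∈ pvU c) :
    pvStepF w ∈ pvU c := by
  simp only [pvU, List.mem_map] at hw
  obtain ⟨g, hg, rfl⟩ := hw
  simp only [pvG, List.mem_cons, List.not_mem_nil, or_false] at hg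
  rcases hg with rfl | rfl | rfl | rfl | rfl | rfl | rfl | rfl <;> rw [pv_stepF_pvN]
  · exact pv_pvN_mem c (fun p => by simp) pv_g_mem_4
  · exact pv_pvN_mem c (fun p => by simp) pv_g_mem_7
  · exact pv_pvN_mem c (fun p => by simp) pv_g_mem_6
  · exact pv_pvN_mem c (fun p => by simp) pv_g_mem_5
  · exact pv_pvN_mem c (fun p => by simp) pv_g_mem_0
  · exact pv_pvN_mem c (fun p => by simp) pv_g_mem_3
  · exact pv_pvN_mem c (fun p => by simp) pv_g_mem_2
  · exact pv_pvN_mem c (fun p => by simp) pv_g_mem_1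

theorem pv_visit_spec (c : List (Int × Int)) :
    ∀ (fuel : Nat) (v : List (Int × Int)) (seen : List (List (Int × Int))),
      v ∈ pvU c → (∀ w ∈ seen, w ∈ pvU c) → pvMsr c seen < fuel →
      (∀ x ∈ seen, x ∈ pvVisit fuel v seen) ∧
      (∀ x ∈ pvVisit fuel v seen, x ∈ pvU c) ∧
      pvSM (pvVisit fuel v seen) v ∧
      (∀ w ∈ pvVisit fuel v seen, w ∈ seen ∨
        (pvSM (pvVisit fuel v seen) (pvStepR w) ∧ pvSM (pvVisit fuel v seen) (pvStepF w))) := by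
  intro fuel
  induction fuel with
  | zero => intro v seen _ _ h; omega
  | succ n ih =>
    intro v seen hv hseen hmsr
    by_cases hg : seen.any (fun w => PySem.Set.equal w v) = true
    · have hres : pvVisit (n + 1) v seen = seen := by simp [pvVisit, hg]
      rw [hres]
      exact ⟨fun x hx => hx, hseen, (pv_sm_any _ _).1 hg, fun w hw => Or.inl hw⟩
    · have hgf : seen.any (fun w => PySem.Set.equal w v) = false := by
        simpa using hg
      have hres : pvVisit (n + 1) v seen
          = pvVisit n (pvStepF v) (pvVisit n (pvStepR v) (seen ++ [v])) := by
        show (if seen.any (fun w => PySem.Set.equal w v) then seen else _) = _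
        rw [if_neg (by simp [hgf])]
        rfl
      have hseen1 : ∀ w ∈ seen ++ [v], w ∈ pvU c := by
        intro w hw
        rcases List.mem_append.1 hw with hw | hw
        · exact hseen w hw
        · rcases List.mem_singleton.1 hw with rfl; exact hv
      have hm1 : pvMsr c (seen ++ [v]) < n := by
        have h1 := pv_msr_lt c hv hgf
        omega
      obtain ⟨q1, q2, q3, q4⟩ := ih (pvStepR v) (seen ++ [v]) (pv_stepR_mem c hv) hseen1 hm1
      have hm2 : pvMsr c (pvVisit n (pvStepR v) (seen ++ [v])) < n := by
        have := pv_msr_mono c q1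
        omega
      obtain ⟨r1, r2, r3, r4⟩ := ih (pvStepF v) (pvVisit n (pvStepR v) (seen ++ [v]))
        (pv_stepF_mem c hv) q2 hm2
      rw [hres]
      refine ⟨?_, r2, ?_, ?_⟩
      · intro x hx
        exact r1 x (q1 x (List.mem_append_left _ hx))
      · exact pv_sm_of_mem (r1 v (q1 v (by simp)))
      · intro w hw
        rcases r4 w hw with hw2 | hcl
        · rcases q4 w hw2 with hw1 | hcl2
          · rcases List.mem_append.1 hw1 with hw0 | hw0
            · exact Or.inl hw0
            · rcases List.mem_singleton.1 hw0 with rfl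
              exact Or.inr ⟨pv_sm_mono r1 q3, r3⟩
          · exact Or.inr ⟨pv_sm_mono r1 hcl2.1, pv_sm_mono r1 hcl2.2⟩
        · exact Or.inr hcl

theorem pv_visit_pairwise :
    ∀ (fuel : Nat) (v : List (Int × Int)) (seen : List (List (Int × Int))),
      seen.Pairwise (fun a b => PySem.Set.equal a b = false) →
      (pvVisit fuel v seen).Pairwise (fun a b => PySem.Set.equal a b = false) := by
  intro fuel
  induction fuel with
  | zero => intro v seen h; exact h
  | succ n ih =>
    intro v seen h
    by_cases hg : seen.any (fun w => PySem.Set.equal w v) = true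
    · simpa [pvVisit, hg] using h
    · have hgf : seen.any (fun w => PySem.Set.equal w v) = false := by simpa using hg
      have hres : pvVisit (n + 1) v seen
          = pvVisit n (pvStepF v) (pvVisit n (pvStepR v) (seen ++ [v])) := by
        show (if seen.any (fun w => PySem.Set.equal w v) then seen else _) = _
        rw [if_neg (by simp [hgf])]
        rfl
      rw [hres]
      apply ih
      apply ih
      rw [List.pairwise_append]
      refine ⟨h, by simp, ?_⟩
      intro a ha b hb
      rcases List.mem_singleton.1 hb with rfl
      have := (List.any_eq_false.1 hgf) a ha
      simp only [Bool.not_eq_true] at this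
      exact this

-- ---- orbit coverage of the DFS result ----
theorem pv_sm_equal {S : List (List (Int × Int))} {a b : List (Int × Int)}
    (h : pvSM S a) (he : PySem.Set.equal a b = true) : pvSM S b := by
  obtain ⟨u, hu, hua⟩ := h
  exact ⟨u, hu, pv_equal_trans hua he⟩

theorem pv_ne_symm : Symmetric (fun a b : List (Int × Int) => PySem.Set.equal a b = false) := by
  intro a b h
  cases hba : PySem.Set.equal b a with
  | false => rfl
  | true => rw [pv_equal_symm hba] at h; cases h

-- A's variants fold
theorem pv_fold_mem : ∀ (l s : List (List (Int × Int))) (x : List (Int × Int)),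
    x ∈ l.foldl pvAddFrozen s → x ∈ s ∨ x ∈ l := by
  intro l
  induction l with
  | nil => intro s x h; exact Or.inl h
  | cons v t ih =>
    intro s x h
    rcases ih _ x h with h1 | h1
    · unfold pvAddFrozen at h1
      split at h1
      · exact Or.inl h1
      · rcases List.mem_append.1 h1 with h2 | h2
        · exact Or.inl h2
        · rcases List.mem_singleton.1 h2 with rfl
          exact Or.inr (by simp)
    · exact Or.inr (List.mem_cons_of_mem _ h1)

theorem pv_fold_grow : ∀ (l s : List (List (Int × Int))) (x : List (Int × Int)),
    x ∈ s → x ∈ l.foldl pvAddFrozen s := by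
  intro l
  induction l with
  | nil => intro s x h; exact h
  | cons v t ih =>
    intro s x h
    apply ih
    unfold pvAddFrozen
    split
    · exact h
    · exact List.mem_append_left _ h

theorem pv_fold_cover : ∀ (l s : List (List (Int × Int))) (u : List (Int × Int)),
    u ∈ l → pvSM (l.foldl pvAddFrozen s) u := by
  intro l
  induction l with
  | nil => intro s u h; cases h
  | cons v t ih =>
    intro s u h
    rcases List.mem_cons.1 h with rfl | h
    · by_cases hg : s.any (fun w => PySem.Set.equal w u) = true
      · obtain ⟨w, hw, he⟩ := (pv_sm_any _ _).1 hg
        refine ⟨w, pv_fold_grow t _ w ?_, he⟩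
        unfold pvAddFrozen
        rw [if_pos hg]
        exact hw
      · refine ⟨u, pv_fold_grow t _ u ?_, pv_equal_refl u⟩
        unfold pvAddFrozen
        rw [if_neg hg]
        exact List.mem_append_right _ (by simp)
    · exact ih _ u h

theorem pv_fold_pairwise : ∀ (l s : List (List (Int × Int))),
    s.Pairwise (fun a b => PySem.Set.equal a b = false) →
    (l.foldl pvAddFrozen s).Pairwise (fun a b => PySem.Set.equal a b = false) := by
  intro l
  induction l with
  | nil => intro s h; exact h
  | cons v t ih =>
    intro s h
    apply ih
    unfold pvAddFrozen
    split
    · exact h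
    · next hg =>
      rw [List.pairwise_append]
      refine ⟨h, by simp, ?_⟩
      intro a ha b hb
      rcases List.mem_singleton.1 hb with rfl
      have hgf : s.any (fun w => PySem.Set.equal w b) = false := by
        simp only [Bool.not_eq_true] at hg; exact hg
      have := (List.any_eq_false.1 hgf) a ha
      simp only [Bool.not_eq_true] at this
      exact this

-- ---- canonical presentation ----
theorem pv_kIn_inj : Function.Injective pvKIn := by
  intro p q h
  simp only [pvKIn, List.cons.injEq] at h
  exact Prod.ext h.1 h.2.1

theorem pv_kOut_inj : Function.Injective pvKOut := by
  intro v
  induction v with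
  | nil =>
    intro w h
    cases w with
    | nil => rfl
    | cons q t => simp [pvKOut] at h
  | cons p t ih =>
    intro w h
    cases w with
    | nil => simp [pvKOut] at h
    | cons q u =>
      simp only [pvKOut, List.flatMap_cons, List.cons_append, List.nil_append,
        List.cons.injEq] at h
      obtain ⟨h1, h2, h3⟩ := h
      have := ih (show pvKOut t = pvKOut u by simpa [pvKOut] using h3)
      rw [this, Prod.ext h1 h2]

theorem pv_nodup_of_mem_U {c : List (Int × Int)} {u : List (Int × Int)} (hu : u ∈ pvU c) :
    u.Nodup := by
  simp only [pvU, List.mem_map] at hu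
  obtain ⟨g, _, rfl⟩ := hu
  unfold pvN pvNormalize
  exact PySem.Set.nodup_ofList _

theorem pv_inSort_eq {w w' : List (Int × Int)} (hw : w.Nodup) (hw' : w'.Nodup)
    (he : PySem.Set.equal w w' = true) :
    @PySem.List.sorted _ _ List.instLinearOrder.toLT List.instLinearOrder.toDecidableLT w pvKIn false
      = @PySem.List.sorted _ _ List.instLinearOrder.toLT List.instLinearOrder.toDecidableLT w' pvKIn false := by
  exact PySem.List.sorted_eq_sorted_of_perm w w' pvKIn pv_kIn_inj
    ((List.perm_ext_iff_of_nodup hw hw').2 ((PySem.Set.equal_iff w w').1 he))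

theorem pv_canon_eq {X Y : List (List (Int × Int))}
    (hXU : ∀ w ∈ X, w.Nodup) (hYU : ∀ w ∈ Y, w.Nodup)
    (hXP : X.Pairwise (fun a b => PySem.Set.equal a b = false))
    (hYP : Y.Pairwise (fun a b => PySem.Set.equal a b = false))
    (hXY : ∀ w ∈ X, pvSM Y w) (hYX : ∀ w ∈ Y, pvSM X w) :
    pvCanon X = pvCanon Y := by
  unfold pvCanon
  refine PySem.List.sorted_eq_sorted_of_perm _ _ pvKOut pv_kOut_inj ?_
  have key : ∀ (Z : List (List (Int × Int))), (∀ w ∈ Z, w.Nodup) →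
      Z.Pairwise (fun a b => PySem.Set.equal a b = false) →
      (Z.map (fun v => @PySem.List.sorted _ _ List.instLinearOrder.toLT List.instLinearOrder.toDecidableLT v pvKIn false)).Nodup := by
    intro Z hZU hZP
    apply List.Nodup.map_on
    · intro x hx y hy hxy
      by_contra hne
      have hR := (List.Pairwise.forall pv_ne_symm hZP) hx hy hne
      have hperm : x.Perm y := by
        have p1 := @PySem.List.sorted_perm _ _ List.instLinearOrder.toLT List.instLinearOrder.toDecidableLT x pvKIn false
        have p2 := @PySem.List.sorted_perm _ _ List.instLinearOrder.toLT List.instLinearOrder.toDecidableLT y pvKIn false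
        rw [hxy] at p1
        exact p1.symm.trans p2
      have : PySem.Set.equal x y = true :=
        (PySem.Set.equal_iff x y).2 (fun a => hperm.mem_iff)
      rw [this] at hR; cases hR
    · exact hZP.imp (fun {a b} h => by
        intro hab
        rw [hab, pv_equal_refl b] at h
        cases h)
  apply (List.perm_ext_iff_of_nodup (key X hXU hXP) (key Y hYU hYP)).2
  intro a
  simp only [List.mem_map]
  constructor
  · rintro ⟨w, hw, rfl⟩
    obtain ⟨w', hw', he⟩ := hXY w hw
    exact ⟨w', hw', pv_inSort_eq (hYU w' hw') (hXU w hw) he⟩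
  · rintro ⟨w, hw, rfl⟩
    obtain ⟨w', hw', he⟩ := hYX w hw
    exact ⟨w', hw', pv_inSort_eq (hXU w' hw') (hYU w hw) he⟩

theorem pv_map_id (c : List (Int × Int)) : c.map (fun p => (p.1, p.2)) = c := by simp

theorem pv_visit_props (c : List (Int × Int)) :
    (∀ x ∈ pvVisit 20 (pvNormB c) [], x ∈ pvU c) ∧
    (∀ u ∈ pvU c, pvSM (pvVisit 20 (pvNormB c) []) u) := by
  have hstart : pvNormB c ∈ pvU c := by
    rw [pv_start_eq]
    exact List.mem_map_of_mem pv_g_mem_0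
  have hmsr : pvMsr c [] < 20 := by
    have h1 : pvMsr c [] ≤ (pvU c).length := List.countP_le_length
    have h2 : (pvU c).length = 8 := by simp [pvU, pvG]
    omega
  obtain ⟨p1, p2, p3, p4⟩ := pv_visit_spec c 20 (pvNormB c) [] hstart (by simp) hmsr
  refine ⟨p2, ?_⟩
  have hclosed : ∀ w ∈ pvVisit 20 (pvNormB c) [],
      pvSM (pvVisit 20 (pvNormB c) []) (pvStepR w) ∧
      pvSM (pvVisit 20 (pvNormB c) []) (pvStepF w) :=
    fun w hw => (p4 w hw).resolve_left (by simp)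
  have push : ∀ x, pvSM (pvVisit 20 (pvNormB c) []) x →
      pvSM (pvVisit 20 (pvNormB c) []) (pvStepR x) ∧
      pvSM (pvVisit 20 (pvNormB c) []) (pvStepF x) := by
    rintro x ⟨w, hw, he⟩
    exact ⟨pv_sm_equal (hclosed w hw).1 (pv_stepR_congr he),
           pv_sm_equal (hclosed w hw).2 (pv_stepF_congr he)⟩
  have h0 : pvSM (pvVisit 20 (pvNormB c) []) (pvN c (fun p => (p.1, p.2))) := by
    rw [← pv_start_eq]; exact p3
  have hR0 : pvStepR (pvN c (fun p : Int × Int => (p.1, p.2))) = pvN c (fun p => (p.2, -p.1)) := by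
    rw [pv_stepR_pvN]
  have hR1 : pvStepR (pvN c (fun p : Int × Int => (p.2, -p.1))) = pvN c (fun p => (-p.1, -p.2)) := by
    rw [pv_stepR_pvN]
  have hR2 : pvStepR (pvN c (fun p : Int × Int => (-p.1, -p.2))) = pvN c (fun p => (-p.2, p.1)) := by
    rw [pv_stepR_pvN]; exact pv_pvN_eqv c (fun p => by simp)
  have hF0 : pvStepF (pvN c (fun p : Int × Int => (p.1, p.2))) = pvN c (fun p => (-p.1, p.2)) := by
    rw [pv_stepF_pvN]
  have hK0 : pvStepR (pvN c (fun p : Int × Int => (-p.1, p.2))) = pvN c (fun p => (p.2, p.1)) := by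
    rw [pv_stepR_pvN]; exact pv_pvN_eqv c (fun p => by simp)
  have hK1 : pvStepR (pvN c (fun p : Int × Int => (p.2, p.1))) = pvN c (fun p => (p.1, -p.2)) := by
    rw [pv_stepR_pvN]
  have hK2 : pvStepR (pvN c (fun p : Int × Int => (p.1, -p.2))) = pvN c (fun p => (-p.2, -p.1)) := by
    rw [pv_stepR_pvN]
  have h1 := hR0 ▸ (push _ h0).1
  have h2 := hR1 ▸ (push _ h1).1
  have h3 := hR2 ▸ (push _ h2).1
  have h4 := hF0 ▸ (push _ h0).2
  have h5 := hK0 ▸ (push _ h4).1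
  have h6 := hK1 ▸ (push _ h5).1
  have h7 := hK2 ▸ (push _ h6).1
  intro u hu
  simp only [pvU, List.mem_map] at hu
  obtain ⟨g, hg, rfl⟩ := hu
  simp only [pvG, List.mem_cons, List.not_mem_nil, or_false] at hg
  rcases hg with rfl | rfl | rfl | rfl | rfl | rfl | rfl | rfl
  · exact h0
  · exact h1
  · exact h2
  · exact h3
  · exact h4
  · exact h5
  · exact h6
  · exact h7

theorem pv_rot_ofList (m : List (Int × Int)) :
    pvRot90 (PySem.Set.ofList m) = PySem.Set.ofList (m.map (fun p => (p.2, -p.1))) := by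
  unfold pvRot90
  exact pv_ofList_map_ofList _ pv_rot_inj m

theorem pv_portA (c : List (Int × Int)) :
    all_orientations c = pvCanon ((pvU c).foldl pvAddFrozen []) := by
  have hrange : PySem.List.pyRange 0 4 1 = [0, 1, 2, 3] := by decide
  have c1 : pvRot90 c = PySem.Set.ofList (c.map (fun p => (p.2, -p.1))) := rfl
  have c2 : pvRot90 (pvRot90 c)
      = PySem.Set.ofList (c.map (fun p : Int × Int => (-p.1, -p.2))) := by
    rw [c1, pv_rot_ofList, List.map_map]
    refine congrArg _ (List.map_congr_left ?_)
    intro p _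
    simp
  have c3 : pvRot90 (pvRot90 (pvRot90 c))
      = PySem.Set.ofList (c.map (fun p : Int × Int => (-p.2, p.1))) := by
    rw [c2, pv_rot_ofList, List.map_map]
    refine congrArg _ (List.map_congr_left ?_)
    intro p _
    simp
  have d0 : pvFlipx c = PySem.Set.ofList (c.map (fun p : Int × Int => (-p.1, p.2))) := rfl
  have d1 : pvRot90 (pvFlipx c)
      = PySem.Set.ofList (c.map (fun p : Int × Int => (p.2, p.1))) := by
    rw [d0, pv_rot_ofList, List.map_map]
    refine congrArg _ (List.map_congr_left ?_)
    intro p _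
    simp
  have d2 : pvRot90 (pvRot90 (pvFlipx c))
      = PySem.Set.ofList (c.map (fun p : Int × Int => (p.1, -p.2))) := by
    rw [d1, pv_rot_ofList, List.map_map]
    refine congrArg _ (List.map_congr_left ?_)
    intro p _
    simp
  have d3 : pvRot90 (pvRot90 (pvRot90 (pvFlipx c)))
      = PySem.Set.ofList (c.map (fun p : Int × Int => (-p.2, -p.1))) := by
    rw [d2, pv_rot_ofList, List.map_map]
    refine congrArg _ (List.map_congr_left ?_)
    intro p _
    simp
  unfold all_orientations
  refine congrArg pvCanon ?_
  rw [hrange]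
  simp only [List.foldl]
  norm_num
  rw [c3, c2, c1, d3, d2, d1, d0]
  simp only [pv_norm_ofList]
  simp only [pvU, pvG, pvN, List.map_cons, List.map_nil, List.foldl_cons, List.foldl_nil]
  rw [pv_map_id]

theorem pv_main (c : List (Int × Int)) : all_orientations c = all_orientations_alt c := by
  rw [pv_portA]
  show _ = pvCanon (pvVisit 20 (pvNormB c) [])
  obtain ⟨hBU, hBcov⟩ := pv_visit_props c
  have hAU : ∀ w ∈ (pvU c).foldl pvAddFrozen [], w ∈ pvU c := by
    intro w hw
    rcases pv_fold_mem _ [] w hw with h | h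
    · cases h
    · exact h
  apply pv_canon_eq
  · exact fun w hw => pv_nodup_of_mem_U (hAU w hw)
  · exact fun w hw => pv_nodup_of_mem_U (hBU w hw)
  · exact pv_fold_pairwise _ [] List.Pairwise.nil
  · exact pv_visit_pairwise 20 _ [] List.Pairwise.nil
  · exact fun w hw => hBcov w (hAU w hw)
  · exact fun w hw => pv_fold_cover _ [] w (hBU w hw)


-- ===== VERDICT (by name: the statement is the Claim_ definition above) =====
theorem all_orientations_spec : Claim_equal_all_orientations := by
  intro coords _ _
  unfold Spec_all_orientations
  exact pv_main coords
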